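-- pv_equiv track=rewrite | github.com/meezlung/git-test | retake/lab00/lab0b.py | least_jumps
-- ===== SOURCE A (Python) =====
-- from collections import deque
--
-- Coord = tuple[int, int]
--
-- def least_jumps(grid: list[list[int]], d: int, u: int, s: Coord, e: Coord) -> int|None:
--     rows, cols = rows, cols = len(grid), len(grid[0])
--     sx, sy = s
--     ex, ey = e
--
--     # DP table: minimal jumps to reach each cell
--     dist = [[float('inf')] * cols for _ in range(rows)]
--     dist[sx][sy] = 0 # base case
--
--     queue = deque([(sx, sy)])
--     directions = [(0, 1), (1, 0), (0, -1), (-1, 0)]  # right, down, left, up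
--
--     while queue:
--         x, y = queue.popleft()
--         curd = dist[x][y]
--
--         for dx, dy in directions:
--             nx, ny = x + dx, y + dy
--             if 0 <= nx < rows and 0 <= ny < cols:
--                 delta = grid[nx][ny] - grid[x][y]
--                 allowed = (delta <= u) if delta > 0 else (-delta <= d)
--                 if not allowed: # new trick is to early exit pog
--                     continue
--
--                 nd = curd + 1
--                 if nd < dist[nx][ny]:
--                     dist[nx][ny] = nd
--                     queue.append((nx, ny))
--
--     return dist[ex][ey] if dist[ex][ey] != float('inf') else None
-- ===== SOURCE B (Python) =====
-- def least_jumps(grid, d, u, s, e):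
--     rows, cols = len(grid), len(grid[0])
--     dist = [[None] * cols for _ in range(rows)]
--     dist[s[0]][s[1]] = 0
--     sources = [s]
--     while True:
--         before = len(sources)
--         # one full relaxation sweep over every node discovered so far
--         for x, y in list(sources):
--             for nx, ny in ((x, y + 1), (x + 1, y), (x, y - 1), (x - 1, y)):
--                 if 0 <= nx < rows and 0 <= ny < cols:
--                     delta = grid[nx][ny] - grid[x][y]
--                     if (delta <= u) if delta > 0 else (-delta <= d):
--                         nd = dist[x][y] + 1
--                         if dist[nx][ny] is None or nd < dist[nx][ny]:
--                             dist[nx][ny] = nd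
--                             sources.append((nx, ny))
--         if len(sources) == before:
--             return dist[e[0]][e[1]]
-- ===== Notes on version B (the rewrite author's own statement) =====
-- stated objective: alternative
-- what changed: A is a deque BFS that pops each discovered cell once and pushes relaxed neighbours; B keeps no queue at all: it repeats Bellman-Ford-style relaxation sweeps over the whole list of discovered sources, appending newly reached cells, until a sweep grows the list no further.
-- outside the precondition, e.g. on least_jumps([[0, 9], [5]], 0, 0, (0, 0), (0, 1)): A returns None, B returns None
import Mathlib
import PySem

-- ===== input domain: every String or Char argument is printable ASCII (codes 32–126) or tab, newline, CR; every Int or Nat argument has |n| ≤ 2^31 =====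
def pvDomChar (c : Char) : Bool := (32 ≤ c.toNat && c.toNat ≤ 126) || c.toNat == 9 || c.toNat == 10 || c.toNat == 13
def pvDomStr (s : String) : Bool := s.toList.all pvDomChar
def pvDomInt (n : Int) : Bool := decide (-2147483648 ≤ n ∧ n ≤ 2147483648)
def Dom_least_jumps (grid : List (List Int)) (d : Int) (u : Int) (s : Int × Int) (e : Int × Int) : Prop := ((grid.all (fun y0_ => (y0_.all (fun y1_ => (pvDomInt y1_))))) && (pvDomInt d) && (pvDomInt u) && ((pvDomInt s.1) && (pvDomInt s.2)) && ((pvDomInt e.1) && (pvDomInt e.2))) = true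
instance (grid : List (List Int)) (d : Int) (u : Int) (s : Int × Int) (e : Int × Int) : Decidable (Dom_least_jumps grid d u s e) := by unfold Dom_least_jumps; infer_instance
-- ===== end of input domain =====

-- B replaces A's deque BFS (each cell popped once) by Bellman-Ford-style relaxation
-- sweeps over the list of discovered sources, iterated until the list stops growing;
-- same return value on Pre_, no claim about speed.

-- shared primitive transliterations of the Python subscript expressions
-- grid[x][y] (Python index semantics; default only where Python would raise, outside Pre_)
def gval (grid : List (List Int)) (x y : Int) : Int :=
  PySem.List.pyGetD (PySem.List.pyGetD grid x []) y 0

-- m[x][y] for an Option-valued matrix (A's inf / B's None is `none`)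
def mval (m : List (List (Option Int))) (x y : Int) : Option Int :=
  PySem.List.pyGetD (PySem.List.pyGetD m x []) y none

-- m[x][y] = v
def mput (m : List (List (Option Int))) (x y : Int) (v : Int) : List (List (Option Int)) :=
  PySem.List.pySetD m x (PySem.List.pySetD (PySem.List.pyGetD m x []) y (some v))

-- [[init]*cols for _ in range(rows)]
def mkMat (rows cols : Int) : List (List (Option Int)) :=
  List.replicate rows.toNat (List.replicate cols.toNat none)

-- ===== PORT A =====
def ajDirs : List (Int × Int) := [(0, 1), (1, 0), (0, -1), (-1, 0)]

-- one direction of A's inner loop (curd is dist[x][y], read once before the loop)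
def ajStep (grid : List (List Int)) (d u rows cols x y curd : Int)
    (st : List (List (Option Int)) × List (Int × Int)) (dir : Int × Int) :
    List (List (Option Int)) × List (Int × Int) :=
  let nx := x + dir.1
  let ny := y + dir.2
  if 0 ≤ nx ∧ nx < rows ∧ 0 ≤ ny ∧ ny < cols then
    let delta := gval grid nx ny - gval grid x y
    let allowed : Bool := if 0 < delta then decide (delta ≤ u) else decide (-delta ≤ d)
    if allowed then
      let nd := curd + 1
      -- nd < dist[nx][ny]  (none plays float('inf'))
      let better : Bool := match mval st.1 nx ny with
        | none => true
        | some v => decide (nd < v)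
      if better then (mput st.1 nx ny nd, st.2 ++ [(nx, ny)]) else st
    else st
  else st

-- A's while loop over the deque (fuel is a totality guard only; large enough under Pre_)
def ajLoop (grid : List (List Int)) (d u rows cols : Int) :
    Nat → List (Int × Int) → List (List (Option Int)) → List (List (Option Int))
  | 0, _, dist => dist
  | _ + 1, [], dist => dist
  | fuel + 1, c :: q, dist =>
    let curd := (mval dist c.1 c.2).getD 0
    let r := ajDirs.foldl (ajStep grid d u rows cols c.1 c.2 curd) (dist, [])
    ajLoop grid d u rows cols fuel (q ++ r.2) r.1

def least_jumps (grid : List (List Int)) (d : Int) (u : Int) (s : Int × Int) (e : Int × Int) : Option Int :=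
  let rows := PySem.List.len grid
  let cols := PySem.List.len (PySem.List.pyGetD grid 0 [])
  let dist := mput (mkMat rows cols) s.1 s.2 0
  let final := ajLoop grid d u rows cols (rows.toNat * cols.toNat + 2) [s] dist
  mval final e.1 e.2

-- ===== PORT B =====
-- ((x, y+1), (x+1, y), (x, y-1), (x-1, y)) — the neighbour tuple B sweeps over
def nbrs (p : Int × Int) : List (Int × Int) :=
  [(p.1, p.2 + 1), (p.1 + 1, p.2), (p.1, p.2 - 1), (p.1 - 1, p.2)]

-- body of B's inner loop: relax the edge (x, y) → nb (dist read at relax time)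
def bRelax (grid : List (List Int)) (d u rows cols x y : Int)
    (st : List (List (Option Int)) × List (Int × Int)) (nb : Int × Int) :
    List (List (Option Int)) × List (Int × Int) :=
  if 0 ≤ nb.1 ∧ nb.1 < rows ∧ 0 ≤ nb.2 ∧ nb.2 < cols then
    let delta := gval grid nb.1 nb.2 - gval grid x y
    if (if 0 < delta then decide (delta ≤ u) else decide (-delta ≤ d)) then
      let nd := (mval st.1 x y).getD 0 + 1
      -- dist[nx][ny] is None or nd < dist[nx][ny]
      let write : Bool := match mval st.1 nb.1 nb.2 with
        | none => true
        | some v => decide (nd < v)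
      if write then (mput st.1 nb.1 nb.2 nd, st.2 ++ [nb]) else st
    else st
  else st

-- relax all four edges out of one discovered source
def bNode (grid : List (List Int)) (d u rows cols : Int)
    (st : List (List (Option Int)) × List (Int × Int)) (c : Int × Int) :
    List (List (Option Int)) × List (Int × Int) :=
  (nbrs c).foldl (bRelax grid d u rows cols c.1 c.2) st

-- one sweep: `for x, y in list(sources)` (the snapshot is the fold's list)
def bSweep (grid : List (List Int)) (d u rows cols : Int)
    (st : List (List (Option Int)) × List (Int × Int)) :
    List (List (Option Int)) × List (Int × Int) :=
  st.2.foldl (bNode grid d u rows cols) st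

-- while True: sweep; if len(sources) == before: return dist[e...]
-- (fuel is a totality guard only; large enough under Pre_)
def bLoop (grid : List (List Int)) (d u rows cols : Int) :
    Nat → List (List (Option Int)) × List (Int × Int) → List (List (Option Int))
  | 0, st => st.1
  | fuel + 1, st =>
    let st' := bSweep grid d u rows cols st
    if st'.2.length = st.2.length then st'.1 else bLoop grid d u rows cols fuel st'

def least_jumps_alt (grid : List (List Int)) (d : Int) (u : Int) (s : Int × Int) (e : Int × Int) : Option Int :=
  let rows := PySem.List.len grid
  let cols := PySem.List.len (PySem.List.pyGetD grid 0 [])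
  let dist := mput (mkMat rows cols) s.1 s.2 0
  let final := bLoop grid d u rows cols (rows.toNat * cols.toNat + 2) (dist, [s])
  mval final e.1 e.2

-- ===== PRECONDITION & SPEC =====
-- Pre_ excludes exactly the inputs where A raises IndexError (empty grid, out-of-range
-- start/end) plus ragged grids with a row shorter than len(grid[0]), where whether A
-- raises depends on BFS reachability of the short row rather than on a closed-form
-- shape condition.
def Pre_least_jumps (grid : List (List Int)) (d : Int) (u : Int) (s : Int × Int) (e : Int × Int) : Prop :=
  grid ≠ [] ∧
  0 < PySem.List.len (PySem.List.pyGetD grid 0 []) ∧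
  (∀ row ∈ grid, PySem.List.len (PySem.List.pyGetD grid 0 []) ≤ PySem.List.len row) ∧
  -PySem.List.len grid ≤ s.1 ∧ s.1 < PySem.List.len grid ∧
  -PySem.List.len (PySem.List.pyGetD grid 0 []) ≤ s.2 ∧ s.2 < PySem.List.len (PySem.List.pyGetD grid 0 []) ∧
  -PySem.List.len grid ≤ e.1 ∧ e.1 < PySem.List.len grid ∧
  -PySem.List.len (PySem.List.pyGetD grid 0 []) ≤ e.2 ∧ e.2 < PySem.List.len (PySem.List.pyGetD grid 0 [])
instance (grid : List (List Int)) (d : Int) (u : Int) (s : Int × Int) (e : Int × Int) : Decidable (Pre_least_jumps grid d u s e) := by unfold Pre_least_jumps; infer_instance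

def pvWitness_least_jumps : List (List Int) × Int × Int × (Int × Int) × (Int × Int) :=
  ([[0, 1], [1, 2]], 1, 1, (0, 0), (1, 1))

def Spec_least_jumps (grid : List (List Int)) (d : Int) (u : Int) (s : Int × Int) (e : Int × Int) (out : Option Int) : Prop := out = least_jumps_alt grid d u s e
instance (grid : List (List Int)) (d : Int) (u : Int) (s : Int × Int) (e : Int × Int) (out : Option Int) : Decidable (Spec_least_jumps grid d u s e out) := by unfold Spec_least_jumps; infer_instance

-- ===== CLAIM (what is proved, stated in full; the proofs are below) =====
def Claim_equal_least_jumps : Prop := ∀ (grid : List (List Int)) (d : Int) (u : Int) (s : Int × Int) (e : Int × Int), Dom_least_jumps grid d u s e → Pre_least_jumps grid d u s e → Spec_least_jumps grid d u s e (least_jumps grid d u s e)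

-- ===== LEMMAS AND PROOFS =====

-- canonical (wrapped) index of a Python in-range index
def cidx (n : Nat) (i : Int) : Nat := if 0 ≤ i then i.toNat else n - (-i).toNat

-- shape of an rows × cols matrix
def ShapeM (rows cols : Int) (m : List (List (Option Int))) : Prop :=
  m.length = rows.toNat ∧ ∀ row ∈ m, row.length = cols.toNat

-- every stored value is ≤ k (queried at canonical coordinates only)
def BoundM (rows cols k : Int) (m : List (List (Option Int))) : Prop :=
  ∀ x y v, 0 ≤ x → x < rows → 0 ≤ y → y < cols → mval m x y = some v → v ≤ k

-- number of none cells
def ncntM (m : List (List (Option Int))) : Nat :=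
  (m.map (fun r => r.countP (fun o => o.isNone))).sum

-- canonical in-bounds coordinate
def InB (rows cols : Int) (p : Int × Int) : Prop :=
  0 ≤ p.1 ∧ p.1 < rows ∧ 0 ≤ p.2 ∧ p.2 < cols

-- the move predicate on the edge p → q (delta = height q - height p)
def aEdge (grid : List (List Int)) (d u : Int) (p q : Int × Int) : Bool :=
  let delta := gval grid q.1 q.2 - gval grid p.1 p.2
  if 0 < delta then decide (delta ≤ u) else decide (-delta ≤ d)

-- q is an allowed neighbour of some member of F
def Touch (grid : List (List Int)) (d u : Int) (F : List (Int × Int)) (q : Int × Int) : Prop :=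
  ∃ c ∈ F, q ∈ nbrs c ∧ aEdge grid d u c q = true

lemma pyIdx?_inrange {n : Nat} {i : Int} (h1 : -(n : Int) ≤ i) (h2 : i < n) :
    PySem.List.pyIdx? n i = some (cidx n i) ∧ cidx n i < n := by
  unfold PySem.List.pyIdx? cidx
  by_cases h0 : 0 ≤ i
  · rw [if_pos h0, if_pos h2, if_pos h0]; exact ⟨rfl, by omega⟩
  · rw [if_neg h0, if_pos h1, if_neg h0]; exact ⟨rfl, by omega⟩

lemma mval_char {rows cols : Int} {m : List (List (Option Int))} (hm : ShapeM rows cols m)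
    {x y : Int} (hx1 : -rows ≤ x) (hx2 : x < rows) (hy1 : -cols ≤ y) (hy2 : y < cols) :
    mval m x y = (m.getD (cidx rows.toNat x) []).getD (cidx cols.toNat y) none := by
  obtain ⟨hL, hrow⟩ := hm
  obtain ⟨hix, hixlt⟩ := pyIdx?_inrange (n := rows.toNat) (i := x) (by omega) (by omega)
  obtain ⟨hiy, hiylt⟩ := pyIdx?_inrange (n := cols.toNat) (i := y) (by omega) (by omega)
  have hixm : cidx rows.toNat x < m.length := by omega
  have hrowlen : m[cidx rows.toNat x].length = cols.toNat := hrow _ (List.getElem_mem hixm)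
  have hiym : cidx cols.toNat y < m[cidx rows.toNat x].length := by omega
  unfold mval PySem.List.pyGetD PySem.List.pyGet?
  rw [hL, hix]
  simp only [Option.bind_some, List.getElem?_eq_getElem hixm, Option.getD_some]
  rw [hrowlen, hiy]
  simp only [Option.bind_some, List.getElem?_eq_getElem hiym, Option.getD_some]
  rw [List.getD_eq_getElem m [] hixm, List.getD_eq_getElem _ none hiym]

lemma mput_char {rows cols : Int} {m : List (List (Option Int))} (hm : ShapeM rows cols m)
    {x y : Int} (hx1 : -rows ≤ x) (hx2 : x < rows) (hy1 : -cols ≤ y) (hy2 : y < cols) (v : Int) :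
    mput m x y v
      = m.set (cidx rows.toNat x) ((m.getD (cidx rows.toNat x) []).set (cidx cols.toNat y) (some v)) := by
  obtain ⟨hL, hrow⟩ := hm
  obtain ⟨hix, hixlt⟩ := pyIdx?_inrange (n := rows.toNat) (i := x) (by omega) (by omega)
  obtain ⟨hiy, hiylt⟩ := pyIdx?_inrange (n := cols.toNat) (i := y) (by omega) (by omega)
  have hixm : cidx rows.toNat x < m.length := by omega
  have hrowlen : m[cidx rows.toNat x].length = cols.toNat := hrow _ (List.getElem_mem hixm)
  have hiym : cidx cols.toNat y < m[cidx rows.toNat x].length := by omega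
  unfold mput PySem.List.pySetD PySem.List.pySet? PySem.List.pyGetD PySem.List.pyGet?
  rw [hL, hix]
  simp only [Option.bind_some, Option.map_some, List.getElem?_eq_getElem hixm, Option.getD_some]
  rw [hrowlen, hiy]
  simp only [Option.map_some, Option.getD_some]
  rw [List.getD_eq_getElem m [] hixm]

lemma pyIdx?_none {n : Nat} {i : Int} (h : ¬(-(n : Int) ≤ i ∧ i < n)) :
    PySem.List.pyIdx? n i = none := by
  unfold PySem.List.pyIdx?
  split_ifs <;> first | rfl | (exfalso; omega)

lemma mval_none_of_xout {m : List (List (Option Int))} {x y : Int}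
    (h : ¬(-(m.length : Int) ≤ x ∧ x < m.length)) : mval m x y = none := by
  unfold mval PySem.List.pyGetD PySem.List.pyGet?
  rw [pyIdx?_none h]
  simp

lemma mval_some_inrange {rows cols : Int} {m : List (List (Option Int))} (hm : ShapeM rows cols m)
    {x y : Int} {w : Int} (hw : mval m x y = some w) :
    -rows ≤ x ∧ x < rows ∧ -cols ≤ y ∧ y < cols := by
  obtain ⟨hL, hrow⟩ := hm
  by_cases hxr : -rows ≤ x ∧ x < rows
  · by_cases hyr : -cols ≤ y ∧ y < cols
    · exact ⟨hxr.1, hxr.2, hyr.1, hyr.2⟩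
    · exfalso
      obtain ⟨hix, hixlt⟩ := pyIdx?_inrange (n := rows.toNat) (i := x) (by omega) (by omega)
      have hixm : cidx rows.toNat x < m.length := by omega
      have hrowlen : m[cidx rows.toNat x].length = cols.toNat := hrow _ (List.getElem_mem hixm)
      unfold mval PySem.List.pyGetD PySem.List.pyGet? at hw
      rw [hL, hix] at hw
      simp only [Option.bind_some, List.getElem?_eq_getElem hixm, Option.getD_some] at hw
      rw [hrowlen, pyIdx?_none (by omega : ¬(-(cols.toNat : Int) ≤ y ∧ y < cols.toNat))] at hw
      simp at hw
  · exfalso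
    rw [mval_none_of_xout (by omega)] at hw
    cases hw

lemma shape_put {rows cols : Int} {m : List (List (Option Int))} (hm : ShapeM rows cols m)
    {x y : Int} (hx1 : -rows ≤ x) (hx2 : x < rows) (hy1 : -cols ≤ y) (hy2 : y < cols) (v : Int) :
    ShapeM rows cols (mput m x y v) := by
  obtain ⟨hL, hrow⟩ := hm
  rw [mput_char ⟨hL, hrow⟩ hx1 hx2 hy1 hy2 v]
  have hixm : cidx rows.toNat x < m.length := by
    have := (pyIdx?_inrange (n := rows.toNat) (i := x) (by omega) (by omega)).2
    omega
  constructor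
  · simpa using hL
  · intro row hmem
    rcases List.mem_or_eq_of_mem_set hmem with h | h
    · exact hrow _ h
    · subst h
      rw [List.length_set, List.getD_eq_getElem m [] hixm]
      exact hrow _ (List.getElem_mem hixm)

lemma mval_put_self {rows cols : Int} {m : List (List (Option Int))} (hm : ShapeM rows cols m)
    {x y : Int} (hx1 : -rows ≤ x) (hx2 : x < rows) (hy1 : -cols ≤ y) (hy2 : y < cols) (v : Int) :
    mval (mput m x y v) x y = some v := by
  have hsh := shape_put hm hx1 hx2 hy1 hy2 v
  have hL := hm.1
  rw [mval_char hsh hx1 hx2 hy1 hy2, mput_char hm hx1 hx2 hy1 hy2 v]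
  have hixm : cidx rows.toNat x < m.length := by
    have := (pyIdx?_inrange (n := rows.toNat) (i := x) (by omega) (by omega)).2
    omega
  have hiy : cidx cols.toNat y < (m.getD (cidx rows.toNat x) []).length := by
    rw [List.getD_eq_getElem m [] hixm]
    have := (pyIdx?_inrange (n := cols.toNat) (i := y) (by omega) (by omega)).2
    rw [hm.2 _ (List.getElem_mem hixm)]
    omega
  rw [List.getD_eq_getElem _ [] (by simpa using hixm)]
  rw [List.getElem_set_self]
  rw [List.getD_eq_getElem _ none (by simpa using hiy)]
  rw [List.getElem_set_self]

lemma getD_set_ne {α : Type} (l : List α) {i j : Nat} (a : α) (dflt : α) (h : i ≠ j) :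
    (l.set i a).getD j dflt = l.getD j dflt := by
  simp [List.getD, List.getElem?_set_ne h]

lemma getD_set_self_of_lt {α : Type} (l : List α) {i : Nat} (a : α) (dflt : α) (h : i < l.length) :
    (l.set i a).getD i dflt = a := by
  simp [List.getD, h]

lemma mval_put_of_some {rows cols : Int} {m : List (List (Option Int))} (hm : ShapeM rows cols m)
    {nx ny : Int} (hx1 : 0 ≤ nx) (hx2 : nx < rows) (hy1 : 0 ≤ ny) (hy2 : ny < cols)
    (hnone : mval m nx ny = none) (v : Int)
    {x y : Int} {w : Int} (hw : mval m x y = some w) :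
    mval (mput m nx ny v) x y = some w := by
  obtain ⟨gx1, gx2, gy1, gy2⟩ := mval_some_inrange hm hw
  have hL := hm.1
  have hsh := shape_put hm (by omega) hx2 (by omega) hy2 v
  have hjxm : cidx rows.toNat nx < m.length := by
    have := (pyIdx?_inrange (n := rows.toNat) (i := nx) (by omega) (by omega)).2
    omega
  have hjy : cidx cols.toNat ny < (m.getD (cidx rows.toNat nx) []).length := by
    rw [List.getD_eq_getElem m [] hjxm, hm.2 _ (List.getElem_mem hjxm)]
    exact (pyIdx?_inrange (n := cols.toNat) (i := ny) (by omega) (by omega)).2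
  rw [mval_char hm gx1 gx2 gy1 gy2] at hw
  rw [mval_char hm (by omega) hx2 (by omega) hy2] at hnone
  rw [mval_char hsh gx1 gx2 gy1 gy2, mput_char hm (by omega) hx2 (by omega) hy2 v]
  by_cases hrow : cidx rows.toNat x = cidx rows.toNat nx
  · rw [hrow, getD_set_self_of_lt _ _ _ (by omega)]
    by_cases hcol : cidx cols.toNat y = cidx cols.toNat ny
    · exfalso
      rw [hrow, hcol, hnone] at hw
      cases hw
    · rw [getD_set_ne _ _ _ (fun hh => hcol hh.symm), ← hrow]
      rw [hrow] at hw ⊢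
      exact hw
  · rw [getD_set_ne _ _ _ (fun hh => hrow hh.symm)]
    exact hw

lemma mval_put_cases {rows cols : Int} {m : List (List (Option Int))} (hm : ShapeM rows cols m)
    {nx ny : Int} (hx1 : -rows ≤ nx) (hx2 : nx < rows) (hy1 : -cols ≤ ny) (hy2 : ny < cols) (v : Int)
    {x y : Int} (gx1 : 0 ≤ x) (gx2 : x < rows) (gy1 : 0 ≤ y) (gy2 : y < cols)
    {w : Int} (hw : mval (mput m nx ny v) x y = some w) :
    w = v ∨ mval m x y = some w := by
  have hL := hm.1
  have hsh := shape_put hm (by omega) hx2 (by omega) hy2 v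
  have hjxm : cidx rows.toNat nx < m.length := by
    have := (pyIdx?_inrange (n := rows.toNat) (i := nx) (by omega) (by omega)).2
    omega
  rw [mval_char hsh (by omega) gx2 (by omega) gy2, mput_char hm (by omega) hx2 (by omega) hy2 v] at hw
  rw [mval_char hm (by omega) gx2 (by omega) gy2]
  by_cases hrow : cidx rows.toNat x = cidx rows.toNat nx
  · rw [hrow, getD_set_self_of_lt _ _ _ (by
      have := (pyIdx?_inrange (n := rows.toNat) (i := nx) (by omega) (by omega)).2
      omega)] at hw
    by_cases hcol : cidx cols.toNat y = cidx cols.toNat ny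
    · have hylt : cidx cols.toNat ny < (m.getD (cidx rows.toNat nx) []).length := by
        rw [List.getD_eq_getElem m [] hjxm, hm.2 _ (List.getElem_mem hjxm)]
        exact (pyIdx?_inrange (n := cols.toNat) (i := ny) (by omega) (by omega)).2
      rw [hcol, getD_set_self_of_lt _ _ _ hylt] at hw
      left; exact (Option.some_inj.mp hw).symm
    · rw [getD_set_ne _ _ _ (fun hh => hcol hh.symm), ← hrow] at hw
      right; exact hw
  · rw [getD_set_ne _ _ _ (fun hh => hrow hh.symm)] at hw
    right; exact hw

-- reading any other canonical cell is unchanged by mput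
lemma mval_put_ne {rows cols : Int} {m : List (List (Option Int))} (hm : ShapeM rows cols m)
    {nx ny : Int} (hx1 : 0 ≤ nx) (hx2 : nx < rows) (hy1 : 0 ≤ ny) (hy2 : ny < cols) (v : Int)
    {x y : Int} (gx1 : 0 ≤ x) (gx2 : x < rows) (gy1 : 0 ≤ y) (gy2 : y < cols)
    (hne : ¬(x = nx ∧ y = ny)) :
    mval (mput m nx ny v) x y = mval m x y := by
  have hsh := shape_put hm (by omega) hx2 (by omega) hy2 v
  have hL := hm.1
  have hjxm : cidx rows.toNat nx < m.length := by
    have := (pyIdx?_inrange (n := rows.toNat) (i := nx) (by omega) (by omega)).2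
    omega
  rw [mval_char hsh (by omega) gx2 (by omega) gy2, mput_char hm (by omega) hx2 (by omega) hy2 v,
    mval_char hm (by omega) gx2 (by omega) gy2]
  have hcx : cidx rows.toNat x = x.toNat := by simp [cidx, gx1]
  have hcnx : cidx rows.toNat nx = nx.toNat := by simp [cidx, hx1]
  have hcy : cidx cols.toNat y = y.toNat := by simp [cidx, gy1]
  have hcny : cidx cols.toNat ny = ny.toNat := by simp [cidx, hy1]
  by_cases hrow : cidx rows.toNat x = cidx rows.toNat nx
  · have hxeq : x = nx := by omega
    have hcol : cidx cols.toNat y ≠ cidx cols.toNat ny := by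
      intro h
      exact hne ⟨hxeq, by omega⟩
    rw [hrow, getD_set_self_of_lt _ _ _ (by omega), getD_set_ne _ _ _ (fun hh => hcol hh.symm)]
  · rw [getD_set_ne _ _ _ (fun hh => hrow hh.symm)]

lemma ncnt_put {rows cols : Int} {m : List (List (Option Int))} (hm : ShapeM rows cols m)
    {nx ny : Int} (hx1 : 0 ≤ nx) (hx2 : nx < rows) (hy1 : 0 ≤ ny) (hy2 : ny < cols)
    (hnone : mval m nx ny = none) (v : Int) :
    ncntM (mput m nx ny v) + 1 = ncntM m := by
  have hL := hm.1
  have hjxm : cidx rows.toNat nx < m.length := by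
    have := (pyIdx?_inrange (n := rows.toNat) (i := nx) (by omega) (by omega)).2
    omega
  have hjy : cidx cols.toNat ny < (m.getD (cidx rows.toNat nx) []).length := by
    rw [List.getD_eq_getElem m [] hjxm, hm.2 _ (List.getElem_mem hjxm)]
    exact (pyIdx?_inrange (n := cols.toNat) (i := ny) (by omega) (by omega)).2
  rw [mval_char hm (by omega) hx2 (by omega) hy2] at hnone
  rw [mput_char hm (by omega) hx2 (by omega) hy2 v]
  set jn := cidx rows.toNat nx with hjn
  set jy := cidx cols.toNat ny with hjyd
  set row := m.getD jn [] with hrowd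
  have hrowelem : row[jy] = none := by
    rw [List.getD_eq_getElem _ none hjy] at hnone
    exact hnone
  have hmdec : m = m.take jn ++ m[jn] :: m.drop (jn + 1) := by
    conv_lhs => rw [← List.take_append_drop jn m]
    rw [List.drop_eq_getElem_cons hjxm]
  have hrowgd : m[jn] = row := (List.getD_eq_getElem m [] hjxm).symm
  have hrowdec : row = row.take jy ++ (none : Option Int) :: row.drop (jy + 1) := by
    conv_lhs => rw [← List.take_append_drop jy row]
    rw [List.drop_eq_getElem_cons hjy, hrowelem]
  have hset : m.set jn (row.set jy (some v)) = m.take jn ++ row.set jy (some v) :: m.drop (jn + 1) :=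
    List.set_eq_take_cons_drop (row.set jy (some v)) hjxm
  rw [hset]
  have hm' : ncntM m = ((m.take jn).map (fun r => r.countP (fun o => o.isNone))).sum
      + (row.countP (fun o => o.isNone) + ((m.drop (jn + 1)).map (fun r => r.countP (fun o => o.isNone))).sum) := by
    conv_lhs => rw [hmdec]
    rw [hrowgd]
    simp [ncntM, List.map_append, List.sum_append]
  have hs' : ncntM (m.take jn ++ row.set jy (some v) :: m.drop (jn + 1))
      = ((m.take jn).map (fun r => r.countP (fun o => o.isNone))).sum
      + ((row.set jy (some v)).countP (fun o => o.isNone) + ((m.drop (jn + 1)).map (fun r => r.countP (fun o => o.isNone))).sum) := by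
    simp [ncntM, List.map_append, List.sum_append]
  have hcset : (row.set jy (some v)).countP (fun o => o.isNone) + 1 = row.countP (fun o => o.isNone) := by
    rw [List.set_eq_take_cons_drop _ hjy]
    conv_rhs => rw [hrowdec]
    simp [List.countP_append]
    omega
  rw [hs', hm']
  omega

lemma shape_mkMat (rows cols : Int) : ShapeM rows cols (mkMat rows cols) := by
  constructor
  · simp [mkMat]
  · intro row hrow
    simp [mkMat] at hrow
    simp [hrow.2]

lemma mval_mkMat {rows cols : Int} {x y : Int}
    (hx1 : -rows ≤ x) (hx2 : x < rows) (hy1 : -cols ≤ y) (hy2 : y < cols) :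
    mval (mkMat rows cols) x y = none := by
  rw [mval_char (shape_mkMat rows cols) hx1 hx2 hy1 hy2]
  have h1 := (pyIdx?_inrange (n := rows.toNat) (i := x) (by omega) (by omega)).2
  have h2 := (pyIdx?_inrange (n := cols.toNat) (i := y) (by omega) (by omega)).2
  rw [List.getD_eq_getElem _ [] (by simpa [mkMat] using h1)]
  simp [mkMat]

-- generic: a fold whose step only appends to the accumulator
lemma foldl_acc_shift {σ β γ : Type} (f : σ × List β → γ → σ × List β)
    (hf : ∀ s a x, f (s, a) x = ((f (s, []) x).1, a ++ (f (s, []) x).2)) :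
    ∀ (xs : List γ) (st : σ × List β),
      List.foldl f st xs = ((List.foldl f (st.1, []) xs).1, st.2 ++ (List.foldl f (st.1, []) xs).2) := by
  intro xs
  induction xs with
  | nil => intro st; simp
  | cons x xs ih =>
    intro st
    obtain ⟨s, a⟩ := st
    simp only [List.foldl_cons]
    rw [hf s a x, ih ((f (s, []) x).1, a ++ (f (s, []) x).2), ih (f (s, []) x)]
    simp [List.append_assoc]

lemma ajStep_acc (grid : List (List Int)) (d u rows cols x y curd : Int) :
    ∀ (s : List (List (Option Int))) (a : List (Int × Int)) (dir : Int × Int),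
      ajStep grid d u rows cols x y curd (s, a) dir
        = ((ajStep grid d u rows cols x y curd (s, []) dir).1,
           a ++ (ajStep grid d u rows cols x y curd (s, []) dir).2) := by
  intro s a dir
  simp only [ajStep]
  split_ifs <;> simp

-- A's handling of one popped cell (curd read from the matrix at pop time)
def aCell (grid : List (List Int)) (d u rows cols : Int)
    (st : List (List (Option Int)) × List (Int × Int)) (c : Int × Int) :
    List (List (Option Int)) × List (Int × Int) :=
  ajDirs.foldl (ajStep grid d u rows cols c.1 c.2 ((mval st.1 c.1 c.2).getD 0)) st

lemma aCell_acc (grid : List (List Int)) (d u rows cols : Int) :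
    ∀ (s : List (List (Option Int))) (a : List (Int × Int)) (c : Int × Int),
      aCell grid d u rows cols (s, a) c
        = ((aCell grid d u rows cols (s, []) c).1, a ++ (aCell grid d u rows cols (s, []) c).2) := by
  intro s a c
  exact foldl_acc_shift _ (ajStep_acc grid d u rows cols c.1 c.2 _) ajDirs (s, a)

lemma ajLoop_nil (grid : List (List Int)) (d u rows cols : Int) (fuel : Nat) (m : List (List (Option Int))) :
    ajLoop grid d u rows cols fuel [] m = m := by
  cases fuel <;> rfl

-- A's one-cell-at-a-time loop processes a whole layer exactly like folding aCell over it
lemma aj_reorder (grid : List (List Int)) (d u rows cols : Int) :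
    ∀ (cells : List (Int × Int)) (fuel : Nat) (m : List (List (Option Int))) (q : List (Int × Int)),
      ajLoop grid d u rows cols (fuel + cells.length) (cells ++ q) m
        = ajLoop grid d u rows cols fuel
            (q ++ (cells.foldl (aCell grid d u rows cols) (m, [])).2)
            (cells.foldl (aCell grid d u rows cols) (m, [])).1 := by
  intro cells
  induction cells with
  | nil => intro fuel m q; simp
  | cons c cs ih =>
    intro fuel m q
    rw [show fuel + (c :: cs).length = (fuel + cs.length) + 1 by simp; omega]
    have hstep : ajLoop grid d u rows cols ((fuel + cs.length) + 1) ((c :: cs) ++ q) m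
        = ajLoop grid d u rows cols (fuel + cs.length)
            ((cs ++ q) ++ (aCell grid d u rows cols (m, []) c).2)
            (aCell grid d u rows cols (m, []) c).1 := rfl
    rw [hstep, List.append_assoc, ih fuel _ (q ++ (aCell grid d u rows cols (m, []) c).2)]
    rw [List.foldl_cons]
    rw [foldl_acc_shift _ (aCell_acc grid d u rows cols) cs (aCell grid d u rows cols (m, []) c)]
    simp [List.append_assoc]

lemma bound_mono {rows cols k : Int} {m : List (List (Option Int))}
    (h : BoundM rows cols k m) : BoundM rows cols (k + 1) m := by
  intro x y v a b c dd hv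
  have := h x y v a b c dd hv
  omega

-- what one layer (or a prefix of it) does to the matrix and to the appended cells
def LayerOut (rows cols k : Int) (tgt : (Int × Int) → Prop)
    (m : List (List (Option Int))) (acc : List (Int × Int))
    (r : List (List (Option Int)) × List (Int × Int)) : Prop :=
  ShapeM rows cols r.1 ∧ BoundM rows cols (k + 1) r.1
  ∧ (∀ p q w, mval m p q = some w → mval r.1 p q = some w)
  ∧ (∀ p : Int × Int, InB rows cols p → ∀ w, mval r.1 p.1 p.2 = some w → mval m p.1 p.2 = some w ∨ w = k + 1)
  ∧ ∃ news, r.2 = acc ++ news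
      ∧ (∀ c ∈ news, InB rows cols c ∧ mval m c.1 c.2 = none ∧ tgt c ∧ mval r.1 c.1 c.2 = some (k + 1))
      ∧ (∀ p : Int × Int, InB rows cols p → mval m p.1 p.2 = none → tgt p → mval r.1 p.1 p.2 = some (k + 1))
      ∧ (∀ p : Int × Int, InB rows cols p → mval m p.1 p.2 = none → p ∉ news → mval r.1 p.1 p.2 = none)
      ∧ (news = [] → r.1 = m)
      ∧ ncntM r.1 + news.length = ncntM m

lemma LayerOut_congr {rows cols k : Int} {tgt tgt' : (Int × Int) → Prop}
    {m : List (List (Option Int))} {acc : List (Int × Int)}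
    {r : List (List (Option Int)) × List (Int × Int)}
    (h : LayerOut rows cols k tgt m acc r)
    (ht : ∀ q : Int × Int, InB rows cols q → mval m q.1 q.2 = none → (tgt q ↔ tgt' q)) :
    LayerOut rows cols k tgt' m acc r := by
  obtain ⟨c1, c2, c3, c4, news, e1, e2, e3, e4, e5, e6⟩ := h
  refine ⟨c1, c2, c3, c4, news, e1, ?_, ?_, e4, e5, e6⟩
  · intro c hc
    obtain ⟨q1, q2, q3, q4⟩ := e2 c hc
    exact ⟨q1, q2, (ht c q1 q2).1 q3, q4⟩
  · intro p h1 h2 h3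
    exact e3 p h1 h2 ((ht p h1 h2).2 h3)

lemma LayerOut_id {rows cols k : Int} {tgt : (Int × Int) → Prop}
    {m : List (List (Option Int))} (acc : List (Int × Int))
    (hm : ShapeM rows cols m) (hb : BoundM rows cols (k + 1) m)
    (ht : ∀ q : Int × Int, InB rows cols q → mval m q.1 q.2 = none → ¬ tgt q) :
    LayerOut rows cols k tgt m acc (m, acc) := by
  refine ⟨hm, hb, fun p q w h => h, fun p _ w h => Or.inl h, [], by simp, ?_, ?_, ?_, fun _ => rfl, by simp⟩
  · intro c hc; cases hc
  · intro p h1 h2 h3; exact absurd h3 (ht p h1 h2)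
  · intro p _ _ _; assumption

lemma LayerOut_mark {rows cols k : Int} {m : List (List (Option Int))} (acc : List (Int × Int))
    (hm : ShapeM rows cols m) (hb : BoundM rows cols (k + 1) m)
    {c : Int × Int} (hcin : InB rows cols c) (hcn : mval m c.1 c.2 = none) :
    LayerOut rows cols k (fun q => q = c) m acc (mput m c.1 c.2 (k + 1), acc ++ [c]) := by
  obtain ⟨hx1, hx2, hy1, hy2⟩ := hcin
  refine ⟨shape_put hm (by omega) hx2 (by omega) hy2 _, ?_, ?_, ?_, [c], rfl, ?_, ?_, ?_, ?_, ?_⟩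
  · intro x y v a b cc dd hv
    rcases mval_put_cases hm (by omega) hx2 (by omega) hy2 _ a b cc dd hv with h | h
    · omega
    · exact hb x y v a b cc dd h
  · intro p q w hw
    exact mval_put_of_some hm hx1 hx2 hy1 hy2 hcn _ hw
  · intro p hp w hw
    rcases mval_put_cases hm (by omega) hx2 (by omega) hy2 _ hp.1 hp.2.1 hp.2.2.1 hp.2.2.2 hw with h | h
    · right; exact h
    · left; exact h
  · intro c' hc'
    rcases List.mem_singleton.mp hc' with rfl
    exact ⟨⟨hx1, hx2, hy1, hy2⟩, hcn, rfl,
      mval_put_self hm (by omega) hx2 (by omega) hy2 _⟩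
  · intro p hp hpn hpt
    subst hpt
    exact mval_put_self hm (by omega) hx2 (by omega) hy2 _
  · intro p hp hpn hpnews
    have hpc : ¬(p.1 = c.1 ∧ p.2 = c.2) := by
      intro h
      exact hpnews (by simp [Prod.ext_iff, h.1, h.2])
    rw [mval_put_ne hm hx1 hx2 hy1 hy2 _ hp.1 hp.2.1 hp.2.2.1 hp.2.2.2 hpc]
    exact hpn
  · intro h; cases h
  · simpa using ncnt_put hm hx1 hx2 hy1 hy2 hcn _

lemma LayerOut_comp {rows cols k : Int} {t1 t2 : (Int × Int) → Prop}
    {m : List (List (Option Int))} {acc : List (Int × Int)}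
    {r1 r2 : List (List (Option Int)) × List (Int × Int)}
    (h1 : LayerOut rows cols k t1 m acc r1)
    (h2 : LayerOut rows cols k t2 r1.1 r1.2 r2) :
    LayerOut rows cols k (fun q => t1 q ∨ t2 q) m acc r2 := by
  obtain ⟨a1, a2, a3, a4, news1, e1, e2, e3, e4, e5, e6⟩ := h1
  obtain ⟨b1, b2, b3, b4, news2, f1, f2, f3, f4, f5, f6⟩ := h2
  have hnone1 : ∀ p : Int × Int, mval r1.1 p.1 p.2 = none → mval m p.1 p.2 = none := by
    intro p hp
    cases hmp : mval m p.1 p.2 with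
    | none => rfl
    | some w => rw [a3 _ _ _ hmp] at hp; cases hp
  refine ⟨b1, b2, ?_, ?_, news1 ++ news2, ?_, ?_, ?_, ?_, ?_, ?_⟩
  · intro p q w hw
    exact b3 p q w (a3 p q w hw)
  · intro p hp w hw
    rcases b4 p hp w hw with h | h
    · exact a4 p hp w h
    · right; exact h
  · rw [f1, e1, List.append_assoc]
  · intro c hc
    rcases List.mem_append.mp hc with h | h
    · obtain ⟨q1, q2, q3, q4⟩ := e2 c h
      exact ⟨q1, q2, Or.inl q3, b3 _ _ _ q4⟩
    · obtain ⟨q1, q2, q3, q4⟩ := f2 c h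
      exact ⟨q1, hnone1 c q2, Or.inr q3, q4⟩
  · intro p hp hpn hpt
    rcases hpt with h | h
    · exact b3 _ _ _ (e3 p hp hpn h)
    · cases hr1 : mval r1.1 p.1 p.2 with
      | none => exact f3 p hp hr1 h
      | some w =>
        rcases a4 p hp w hr1 with hh | hh
        · rw [hpn] at hh; cases hh
        · subst hh; exact b3 _ _ _ hr1
  · intro p hp hpn hpnews
    have h1' : p ∉ news1 := fun hh => hpnews (List.mem_append.mpr (Or.inl hh))
    have h2' : p ∉ news2 := fun hh => hpnews (List.mem_append.mpr (Or.inr hh))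
    exact f4 p hp (e4 p hp hpn h1') h2'
  · intro h
    rcases List.append_eq_nil_iff.mp h with ⟨hn1, hn2⟩
    rw [f5 hn2, e5 hn1]
  · rw [List.length_append]
    omega

-- one ajStep (with curd = k) either marks a fresh allowed in-bounds neighbour or does nothing
lemma ajStep_cases (grid : List (List Int)) (d u rows cols x y k : Int)
    {m : List (List (Option Int))} (acc : List (Int × Int)) (dir : Int × Int)
    (hb : BoundM rows cols (k + 1) m) :
    (InB rows cols (x + dir.1, y + dir.2)
      ∧ aEdge grid d u (x, y) (x + dir.1, y + dir.2) = true
      ∧ mval m (x + dir.1) (y + dir.2) = none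
      ∧ ajStep grid d u rows cols x y k (m, acc) dir
          = (mput m (x + dir.1) (y + dir.2) (k + 1), acc ++ [(x + dir.1, y + dir.2)]))
    ∨ (¬(InB rows cols (x + dir.1, y + dir.2)
          ∧ aEdge grid d u (x, y) (x + dir.1, y + dir.2) = true
          ∧ mval m (x + dir.1) (y + dir.2) = none)
        ∧ ajStep grid d u rows cols x y k (m, acc) dir = (m, acc)) := by
  have hedge : aEdge grid d u (x, y) (x + dir.1, y + dir.2)
      = (if 0 < gval grid (x + dir.1) (y + dir.2) - gval grid x y
          then decide (gval grid (x + dir.1) (y + dir.2) - gval grid x y ≤ u)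
          else decide (-(gval grid (x + dir.1) (y + dir.2) - gval grid x y) ≤ d)) := rfl
  by_cases hin : InB rows cols (x + dir.1, y + dir.2)
  · have hin' : 0 ≤ x + dir.1 ∧ x + dir.1 < rows ∧ 0 ≤ y + dir.2 ∧ y + dir.2 < cols := hin
    by_cases hal : aEdge grid d u (x, y) (x + dir.1, y + dir.2) = true
    · cases hv : mval m (x + dir.1) (y + dir.2) with
      | none =>
        left
        refine ⟨hin, hal, rfl, ?_⟩
        simp only [ajStep]
        rw [if_pos hin', ← hedge, if_pos hal, hv]
        simp
      | some v =>
        right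
        refine ⟨fun h => by simpa [hv] using h.2.2, ?_⟩
        have hvle : v ≤ k + 1 := hb _ _ v hin.1 hin.2.1 hin.2.2.1 hin.2.2.2 hv
        simp only [ajStep]
        rw [if_pos hin', ← hedge, if_pos hal, hv]
        simp [show ¬(k + 1 < v) by omega]
    · right
      refine ⟨fun h => hal h.2.1, ?_⟩
      simp only [ajStep]
      rw [if_pos hin', ← hedge, if_neg hal]
  · right
    refine ⟨fun h => hin h.1, ?_⟩
    have hin'' : ¬(0 ≤ x + dir.1 ∧ x + dir.1 < rows ∧ 0 ≤ y + dir.2 ∧ y + dir.2 < cols) := hin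
    simp only [ajStep]
    rw [if_neg hin'']

lemma ajDirs_targets (x y : Int) :
    ajDirs.map (fun t => (x + t.1, y + t.2)) = nbrs (x, y) := by
  simp only [ajDirs, nbrs, List.map_cons, List.map_nil]
  norm_num
  omega

lemma aj_dirs_char (grid : List (List Int)) (d u rows cols x y k : Int) :
    ∀ (ds : List (Int × Int)) (m : List (List (Option Int))) (acc : List (Int × Int)),
      ShapeM rows cols m → BoundM rows cols (k + 1) m →
      LayerOut rows cols k
        (fun q => q ∈ ds.map (fun t => (x + t.1, y + t.2)) ∧ aEdge grid d u (x, y) q = true)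
        m acc (ds.foldl (ajStep grid d u rows cols x y k) (m, acc)) := by
  intro ds
  induction ds with
  | nil =>
    intro m acc hm hb
    exact LayerOut_congr (LayerOut_id acc hm hb (fun q _ _ h => h)) (by simp)
  | cons dir ds ih =>
    intro m acc hm hb
    rcases ajStep_cases grid d u rows cols x y k acc dir hb with
      ⟨hin, hal, hnone, heq⟩ | ⟨hcond, heq⟩
    · obtain ⟨q1, q2, q3, q4⟩ := id hin
      have L1 := LayerOut_mark acc hm hb hin hnone
      have hm1 : ShapeM rows cols (mput m (x + dir.1) (y + dir.2) (k + 1)) :=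
        shape_put hm (by omega) q2 (by omega) q4 _
      have hb1 : BoundM rows cols (k + 1) (mput m (x + dir.1) (y + dir.2) (k + 1)) := by
        intro a b v p1 p2 p3 p4 hv
        rcases mval_put_cases hm (by omega) q2 (by omega) q4 _ p1 p2 p3 p4 hv with h | h
        · omega
        · exact hb a b v p1 p2 p3 p4 h
      have L2 := ih (mput m (x + dir.1) (y + dir.2) (k + 1)) (acc ++ [(x + dir.1, y + dir.2)]) hm1 hb1
      have hC := LayerOut_comp L1 (by rw [← heq] at L2; exact L2)
      rw [List.foldl_cons]
      refine LayerOut_congr hC ?_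
      intro q hq hqn
      constructor
      · rintro (rfl | ⟨h1, h2⟩)
        · exact ⟨by simp, hal⟩
        · exact ⟨by simp [List.mem_cons]; right; simpa using h1, h2⟩
      · rintro ⟨h1, h2⟩
        simp only [List.map_cons, List.mem_cons] at h1
        rcases h1 with rfl | h1
        · exact Or.inl rfl
        · exact Or.inr ⟨by simpa using h1, h2⟩
    · have L1 : LayerOut rows cols k (fun _ => False) m acc (m, acc) :=
        LayerOut_id acc hm hb (fun q _ _ h => h)
      have L2 := ih m acc hm hb
      have hC := LayerOut_comp L1 L2
      rw [List.foldl_cons, heq]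
      exact LayerOut_congr hC (by
        intro q hq hqn
        constructor
        · rintro (h | ⟨h1, h2⟩)
          · cases h
          · exact ⟨by simp only [List.map_cons, List.mem_cons]; right; simpa using h1, h2⟩
        · rintro ⟨h1, h2⟩
          simp only [List.map_cons, List.mem_cons] at h1
          rcases h1 with rfl | h1
          · exact absurd ⟨hq, h2, hqn⟩ hcond
          · exact Or.inr ⟨by simpa using h1, h2⟩)

lemma aj_front_char (grid : List (List Int)) (d u rows cols k : Int) :
    ∀ (F : List (Int × Int)) (m : List (List (Option Int))) (acc : List (Int × Int)),
      ShapeM rows cols m → BoundM rows cols (k + 1) m →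
      (∀ c ∈ F, mval m c.1 c.2 = some k) →
      LayerOut rows cols k (Touch grid d u F) m acc
        (F.foldl (aCell grid d u rows cols) (m, acc)) := by
  intro F
  induction F with
  | nil =>
    intro m acc hm hb _
    refine LayerOut_congr (LayerOut_id acc hm hb (fun q _ _ h => h)) ?_
    intro q _ _
    simp [Touch]
  | cons c F ih =>
    intro m acc hm hb hval
    have hcurd : (mval m c.1 c.2).getD 0 = k := by rw [hval c List.mem_cons_self]; rfl
    have hcell : aCell grid d u rows cols (m, acc) c
        = ajDirs.foldl (ajStep grid d u rows cols c.1 c.2 k) (m, acc) := by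
      simp only [aCell, hcurd]
    have L1 := aj_dirs_char grid d u rows cols c.1 c.2 k ajDirs m acc hm hb
    rw [← hcell] at L1
    have hsh1 : ShapeM rows cols (aCell grid d u rows cols (m, acc) c).1 := L1.1
    have hb1 : BoundM rows cols (k + 1) (aCell grid d u rows cols (m, acc) c).1 := L1.2.1
    have hval1 : ∀ c' ∈ F, mval (aCell grid d u rows cols (m, acc) c).1 c'.1 c'.2 = some k := by
      intro c' hc'
      exact L1.2.2.1 _ _ _ (hval c' (List.mem_cons_of_mem _ hc'))
    have L2 := ih (aCell grid d u rows cols (m, acc) c).1 (aCell grid d u rows cols (m, acc) c).2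
      hsh1 hb1 hval1
    have hC := LayerOut_comp L1 L2
    have hfold : (c :: F).foldl (aCell grid d u rows cols) (m, acc)
        = F.foldl (aCell grid d u rows cols)
            ((aCell grid d u rows cols (m, acc) c).1, (aCell grid d u rows cols (m, acc) c).2) := by
      rw [List.foldl_cons]
    rw [hfold]
    refine LayerOut_congr hC ?_
    intro q hq hqn
    rw [ajDirs_targets]
    constructor
    · rintro (⟨h1, h2⟩ | ⟨c', hc', h1, h2⟩)
      · exact ⟨c, List.mem_cons_self, h1, h2⟩
      · exact ⟨c', List.mem_cons_of_mem _ hc', h1, h2⟩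
    · rintro ⟨c', hc', h1, h2⟩
      rcases List.mem_cons.mp hc' with rfl | hc'
      · exact Or.inl ⟨h1, h2⟩
      · exact Or.inr ⟨c', hc', h1, h2⟩

lemma ncnt_le {rows cols : Int} {m : List (List (Option Int))} (hm : ShapeM rows cols m) :
    ncntM m ≤ rows.toNat * cols.toNat := by
  obtain ⟨hL, hrow⟩ := hm
  rw [← hL]
  clear hL
  induction m with
  | nil => simp [ncntM]
  | cons r t ih =>
    have h1 : r.countP (fun o => o.isNone) ≤ cols.toNat := by
      have := List.countP_le_length (l := r) (p := fun o => o.isNone)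
      rw [hrow r List.mem_cons_self] at this
      exact this
    have h2 := ih (fun row h => hrow row (List.mem_cons_of_mem _ h))
    simp only [ncntM, List.map_cons, List.sum_cons, List.length_cons] at *
    calc r.countP (fun o => o.isNone) + (t.map (fun r => r.countP (fun o => o.isNone))).sum
        ≤ cols.toNat + t.length * cols.toNat := Nat.add_le_add h1 h2
      _ = (t.length + 1) * cols.toNat := by ring

lemma foldl_fixed {α β : Type} (f : α → β → α) (a : α) :
    ∀ l : List β, (∀ x ∈ l, f a x = a) → l.foldl f a = a := by
  intro l
  induction l with
  | nil => intro _; rfl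
  | cons x l ih =>
    intro h
    rw [List.foldl_cons, h x List.mem_cons_self]
    exact ih (fun y hy => h y (List.mem_cons_of_mem _ hy))

-- already-settled sources: every allowed in-bounds edge out of them is already relaxed
def PrefixOK (grid : List (List Int)) (d u rows cols : Int)
    (m : List (List (Option Int))) (P : List (Int × Int)) : Prop :=
  ∀ c ∈ P, ∃ j, mval m c.1 c.2 = some j ∧
    ∀ q ∈ nbrs c, InB rows cols q → aEdge grid d u c q = true →
      ∃ a, mval m q.1 q.2 = some a ∧ a ≤ j + 1

-- relaxing a settled source does nothing
lemma bNode_noop (grid : List (List Int)) (d u rows cols : Int)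
    {m : List (List (Option Int))} (acc : List (Int × Int)) {c : Int × Int}
    {j : Int} (hj : mval m c.1 c.2 = some j)
    (hset : ∀ q ∈ nbrs c, InB rows cols q → aEdge grid d u c q = true →
      ∃ a, mval m q.1 q.2 = some a ∧ a ≤ j + 1) :
    bNode grid d u rows cols (m, acc) c = (m, acc) := by
  unfold bNode
  refine foldl_fixed _ _ _ ?_
  intro nb hnb
  simp only [bRelax]
  by_cases hin : 0 ≤ nb.1 ∧ nb.1 < rows ∧ 0 ≤ nb.2 ∧ nb.2 < cols
  · rw [if_pos hin]
    by_cases hal : (if 0 < gval grid nb.1 nb.2 - gval grid c.1 c.2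
        then decide (gval grid nb.1 nb.2 - gval grid c.1 c.2 ≤ u)
        else decide (-(gval grid nb.1 nb.2 - gval grid c.1 c.2) ≤ d)) = true
    · rw [if_pos hal]
      obtain ⟨a, ha, hle⟩ := hset nb hnb hin hal
      rw [hj, ha]
      simp [show ¬(j + 1 < a) by omega]
    · rw [if_neg hal]
  · rw [if_neg hin]

-- with the source's distance known, B's relax step is A's relax step
lemma bRelax_eq_ajStep (grid : List (List Int)) (d u rows cols k : Int)
    {m : List (List (Option Int))} (acc : List (Int × Int)) (c : Int × Int) (dir : Int × Int)
    (hval : mval m c.1 c.2 = some k) :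
    bRelax grid d u rows cols c.1 c.2 (m, acc) (c.1 + dir.1, c.2 + dir.2)
      = ajStep grid d u rows cols c.1 c.2 k (m, acc) dir := by
  simp only [bRelax, ajStep, hval, Option.getD_some]

-- B's inner fold over the four neighbours is A's fold over the four directions
lemma bdirs_eq_ajdirs (grid : List (List Int)) (d u rows cols k : Int) :
    ∀ (ds : List (Int × Int)) (m : List (List (Option Int))) (acc : List (Int × Int))
      (c : Int × Int),
      ShapeM rows cols m → BoundM rows cols (k + 1) m → mval m c.1 c.2 = some k →
      (ds.map (fun t => (c.1 + t.1, c.2 + t.2))).foldl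
          (bRelax grid d u rows cols c.1 c.2) (m, acc)
        = ds.foldl (ajStep grid d u rows cols c.1 c.2 k) (m, acc) := by
  intro ds
  induction ds with
  | nil => intro m acc c _ _ _; rfl
  | cons dir ds ih =>
    intro m acc c hm hb hval
    rw [List.map_cons, List.foldl_cons, List.foldl_cons,
      bRelax_eq_ajStep grid d u rows cols k acc c dir hval]
    rcases ajStep_cases grid d u rows cols c.1 c.2 k acc dir hb with
      ⟨hin, _, hnone, heq⟩ | ⟨_, heq⟩
    · rw [heq]
      obtain ⟨q1, q2, q3, q4⟩ := id hin
      exact ih (mput m (c.1 + dir.1) (c.2 + dir.2) (k + 1)) (acc ++ [(c.1 + dir.1, c.2 + dir.2)]) c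
        (shape_put hm (by omega) q2 (by omega) q4 _)
        (by
          intro a b v p1 p2 p3 p4 hv
          rcases mval_put_cases hm (by omega) q2 (by omega) q4 _ p1 p2 p3 p4 hv with h | h
          · omega
          · exact hb a b v p1 p2 p3 p4 h)
        (mval_put_of_some hm q1 q2 q3 q4 hnone _ hval)
    · rw [heq]
      exact ih m acc c hm hb hval

-- hence B's per-source processing is A's per-cell processing
lemma bNode_eq_aCell (grid : List (List Int)) (d u rows cols k : Int)
    {m : List (List (Option Int))} (acc : List (Int × Int)) (c : Int × Int)
    (hm : ShapeM rows cols m) (hb : BoundM rows cols (k + 1) m)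
    (hval : mval m c.1 c.2 = some k) :
    bNode grid d u rows cols (m, acc) c = aCell grid d u rows cols (m, acc) c := by
  have hn : nbrs c = ajDirs.map (fun t => (c.1 + t.1, c.2 + t.2)) := by
    rw [ajDirs_targets c.1 c.2]
  unfold bNode aCell
  rw [hn, hval]
  exact bdirs_eq_ajdirs grid d u rows cols k ajDirs m acc c hm hb hval

-- B's fold over one whole layer is A's fold over it
lemma bfront_eq_afront (grid : List (List Int)) (d u rows cols k : Int) :
    ∀ (F : List (Int × Int)) (m : List (List (Option Int))) (acc : List (Int × Int)),
      ShapeM rows cols m → BoundM rows cols (k + 1) m →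
      (∀ c ∈ F, mval m c.1 c.2 = some k) →
      F.foldl (bNode grid d u rows cols) (m, acc)
        = F.foldl (aCell grid d u rows cols) (m, acc) := by
  intro F
  induction F with
  | nil => intro m acc _ _ _; rfl
  | cons c F ih =>
    intro m acc hm hb hval
    rw [List.foldl_cons, List.foldl_cons,
      bNode_eq_aCell grid d u rows cols k acc c hm hb (hval c List.mem_cons_self)]
    have L := aj_front_char grid d u rows cols k [c] m acc hm hb
      (fun c' hc' => by
        have hcc : c' = c := List.mem_singleton.mp hc'
        rw [hcc]
        exact hval c List.mem_cons_self)
    have hfold : ([c].foldl (aCell grid d u rows cols) (m, acc))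
        = aCell grid d u rows cols (m, acc) c := rfl
    rw [hfold] at L
    have h1 : aCell grid d u rows cols (m, acc) c
        = ((aCell grid d u rows cols (m, acc) c).1, (aCell grid d u rows cols (m, acc) c).2) := rfl
    rw [h1]
    exact ih _ _ L.1 L.2.1
      (fun c' hc' => L.2.2.1 _ _ _ (hval c' (List.mem_cons_of_mem _ hc')))

-- settled sources stay settled and the new layer becomes settled after it is relaxed
lemma prefix_noop_fold (grid : List (List Int)) (d u rows cols : Int) :
    ∀ (P : List (Int × Int)) (m : List (List (Option Int))) (acc : List (Int × Int)),
      PrefixOK grid d u rows cols m P →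
      P.foldl (bNode grid d u rows cols) (m, acc) = (m, acc) := by
  intro P m acc hP
  refine foldl_fixed _ _ _ ?_
  intro c hc
  obtain ⟨j, hj, hset⟩ := hP c hc
  exact bNode_noop grid d u rows cols acc hj hset

-- the two loops compute the same final matrix
lemma loops_eq (grid : List (List Int)) (d u rows cols : Int) :
    ∀ fuelA : Nat, ∀ (fuelB : Nat) (k : Int) (pre front : List (Int × Int))
      (m : List (List (Option Int))),
      ShapeM rows cols m → BoundM rows cols k m →
      (∀ c ∈ front, mval m c.1 c.2 = some k) →
      PrefixOK grid d u rows cols m pre →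
      ncntM m + front.length < fuelA → ncntM m < fuelB →
      ajLoop grid d u rows cols fuelA front m
        = bLoop grid d u rows cols fuelB (m, pre ++ front) := by
  intro fuelA
  induction fuelA using Nat.strong_induction_on with
  | _ fuelA ih =>
    intro fuelB k pre front m hm hbk hfo hpre hfA hfB
    obtain ⟨fb, rfl⟩ : ∃ fb, fuelB = fb + 1 := ⟨fuelB - 1, by omega⟩
    have L := aj_front_char grid d u rows cols k front m (pre ++ front) hm (bound_mono hbk) hfo
    obtain ⟨c1, c2, c3, c4, news, e1, e2, e3, e4, e5, e6⟩ := L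
    set r := front.foldl (aCell grid d u rows cols) (m, pre ++ front) with hr
    have hsweep : bSweep grid d u rows cols (m, pre ++ front) = r := by
      unfold bSweep
      show (pre ++ front).foldl (bNode grid d u rows cols) (m, pre ++ front) = r
      rw [List.foldl_append, prefix_noop_fold grid d u rows cols pre m (pre ++ front) hpre]
      exact bfront_eq_afront grid d u rows cols k front m (pre ++ front) hm (bound_mono hbk) hfo
    have hr2 : r.2 = (pre ++ front) ++ news := e1
    have hle : front.length ≤ fuelA := by omega
    have hre := aj_reorder grid d u rows cols front (fuelA - front.length) m []
    rw [show fuelA - front.length + front.length = fuelA by omega, List.append_nil] at hre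
    -- the layer fold with accumulator [] has the same matrix and appends news
    have hshift := foldl_acc_shift _ (aCell_acc grid d u rows cols) front (m, pre ++ front)
    have hm1 : r.1 = (front.foldl (aCell grid d u rows cols) (m, [])).1 := by
      rw [hr, hshift]
    have hn1 : r.2 = (pre ++ front) ++ (front.foldl (aCell grid d u rows cols) (m, [])).2 := by
      rw [hr, hshift]
    have hnews : (front.foldl (aCell grid d u rows cols) (m, [])).2 = news := by
      have := hr2
      rw [hn1] at this
      exact List.append_cancel_left this
    have hBun : bLoop grid d u rows cols (fb + 1) (m, pre ++ front)
        = if (bSweep grid d u rows cols (m, pre ++ front)).2.length = (pre ++ front).length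
          then (bSweep grid d u rows cols (m, pre ++ front)).1
          else bLoop grid d u rows cols fb (bSweep grid d u rows cols (m, pre ++ front)) := rfl
    cases hnn : news with
    | nil =>
      have hrm : r.1 = m := e5 hnn
      rw [hBun, if_pos (by rw [hsweep, hr2, hnn, List.append_nil]), hsweep, hrm]
      rw [hre, hnews, hnn]
      simp only [List.nil_append]
      rw [ajLoop_nil]
      exact hm1.symm.trans hrm
    | cons c0 ns =>
      have hlen : (bSweep grid d u rows cols (m, pre ++ front)).2.length ≠ (pre ++ front).length := by
        rw [hsweep, hr2, hnn]
        simp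
      rw [hBun, if_neg hlen, hsweep, hre, hnews]
      -- invariants for the next round
      have hfo1 : ∀ c ∈ news, mval r.1 c.1 c.2 = some (k + 1) := by
        intro c hc
        exact (e2 c hc).2.2.2
      have hpre1 : PrefixOK grid d u rows cols r.1 (pre ++ front) := by
        intro c hc
        rcases List.mem_append.mp hc with hcp | hcf
        · obtain ⟨j, hj, hset⟩ := hpre c hcp
          refine ⟨j, c3 _ _ _ hj, ?_⟩
          intro q hq hqin hqal
          obtain ⟨a, ha, hale⟩ := hset q hq hqin hqal
          exact ⟨a, c3 _ _ _ ha, hale⟩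
        · refine ⟨k, c3 _ _ _ (hfo c hcf), ?_⟩
          intro q hq hqin hqal
          cases hvq : mval m q.1 q.2 with
          | some a =>
            have := hbk _ _ a hqin.1 hqin.2.1 hqin.2.2.1 hqin.2.2.2 hvq
            exact ⟨a, c3 _ _ _ hvq, by omega⟩
          | none =>
            exact ⟨k + 1, e3 q hqin hvq ⟨c, hcf, hq, hqal⟩, by omega⟩
      have hnl : news.length ≥ 1 := by rw [hnn]; simp
      have hfront1 : front.length ≥ 1 := by
        cases front with
        | nil =>
          exfalso
          have hrnil : r = (m, pre ++ []) := hr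
          rw [hrnil] at hr2
          have h2 : pre = pre ++ news := by simpa using hr2
          have h3 : news = [] := by
            have hlen2 := congrArg List.length h2
            simp only [List.length_append] at hlen2
            have : news.length = 0 := by omega
            exact List.eq_nil_of_length_eq_zero this
          rw [h3] at hnn
          cases hnn
        | cons _ _ => simp
      have hIH := ih (fuelA - front.length)
        (by omega) fb (k + 1) (pre ++ front) news r.1 c1 c2 hfo1 hpre1
        (by omega) (by omega)
      rw [hm1] at hIH
      have hrp : r = ((front.foldl (aCell grid d u rows cols) (m, [])).1, (pre ++ front) ++ news) := by
        rw [hr, hshift, hnews]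
      rw [List.nil_append, hrp]
      exact hIH

-- ===== VERDICT (by name: the statement is the Claim_ definition above) =====
theorem least_jumps_spec : Claim_equal_least_jumps := by
  intro grid d u s e hdom hpre
  unfold Spec_least_jumps
  obtain ⟨hne, hcols, hrows, hs1a, hs1b, hs2a, hs2b, he1a, he1b, he2a, he2b⟩ := hpre
  simp only [least_jumps, least_jumps_alt]
  set rows := PySem.List.len grid with hrowsdef
  set cols := PySem.List.len (PySem.List.pyGetD grid 0 []) with hcolsdef
  set m0 := mput (mkMat rows cols) s.1 s.2 0 with hm0
  have hsm : ShapeM rows cols (mkMat rows cols) := shape_mkMat rows cols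
  have hsh0 : ShapeM rows cols m0 := shape_put hsm hs1a hs1b hs2a hs2b 0
  have hb0 : BoundM rows cols 0 m0 := by
    intro x y v hx1 hx2 hy1 hy2 hw
    rcases mval_put_cases hsm hs1a hs1b hs2a hs2b 0 hx1 hx2 hy1 hy2 hw with h | h
    · omega
    · rw [mval_mkMat (by omega) hx2 (by omega) hy2] at h
      cases h
  have hfo0 : ∀ c ∈ [s], mval m0 c.1 c.2 = some 0 := by
    intro c hc
    rcases List.mem_singleton.mp hc with rfl
    exact mval_put_self hsm hs1a hs1b hs2a hs2b 0
  have hpre0 : PrefixOK grid d u rows cols m0 [] := by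
    intro c hc
    cases hc
  have hcnt0 : ncntM m0 ≤ rows.toNat * cols.toNat := ncnt_le hsh0
  rw [loops_eq grid d u rows cols (rows.toNat * cols.toNat + 2) (rows.toNat * cols.toNat + 2)
    0 [] [s] m0 hsh0 hb0 hfo0 hpre0
    (by simp only [List.length_cons, List.length_nil]; omega) (by omega)]
  simp only [List.nil_append]
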